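-- pv_equiv track=rewrite | github.com/jiayifan21/aa_rnn_cps | step2_thread model_test.py | checkAtt
-- ===== SOURCE A (Python) =====
-- def checkAtt(state,df_train_y):
--     attackList_y = []
--     attackList_pre = []
--     a = 0
--     for i in range(1,len(state)):
--         if df_train_y[i-1] == 0 and df_train_y[i] == 1:
--             a+=1
--             attackList_y.append(a)
--
--         if state[i-1] == 0 and state[i] == 1:
--             attackList_pre.append(a)
--
--     return attackList_y,attackList_pre
-- ===== SOURCE B (Python) =====
-- def checkAtt(state, df_train_y):
--     n = len(state)
--     cum = [0]
--     c = 0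
--     for i in range(1, n):
--         if df_train_y[i-1] == 0 and df_train_y[i] == 1:
--             c += 1
--         cum.append(c)
--     attackList_y = list(range(1, c + 1))
--     attackList_pre = [cum[i] for i in range(1, n) if state[i-1] == 0 and state[i] == 1]
--     return attackList_y, attackList_pre
-- ===== Notes on version B (the rewrite author's own statement) =====
-- stated objective: alternative
-- what changed: Replaces A's single fused loop that threads a live counter through both appends with a prefix-count table pass over df_train_y, a closed-form range(1, total+1) for attackList_y, and a separate comprehension over state that reads the table.
import Mathlib
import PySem

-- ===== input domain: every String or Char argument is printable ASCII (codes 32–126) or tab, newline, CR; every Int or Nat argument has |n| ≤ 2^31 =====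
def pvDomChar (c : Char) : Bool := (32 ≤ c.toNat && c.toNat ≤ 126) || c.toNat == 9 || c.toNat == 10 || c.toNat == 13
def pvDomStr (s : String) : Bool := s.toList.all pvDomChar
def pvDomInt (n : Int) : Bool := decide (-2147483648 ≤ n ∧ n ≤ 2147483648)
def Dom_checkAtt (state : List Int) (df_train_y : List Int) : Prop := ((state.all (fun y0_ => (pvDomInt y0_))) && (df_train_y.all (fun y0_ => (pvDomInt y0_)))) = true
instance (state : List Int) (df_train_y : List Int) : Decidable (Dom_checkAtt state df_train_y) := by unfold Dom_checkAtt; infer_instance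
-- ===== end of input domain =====

-- B replaces A's fused counter loop by a prefix-count table, a closed-form range for the first list
-- and a separate comprehension pass for the second (objective: alternative decomposition, same cost).

-- ===== PORT A =====
-- one fused loop carrying (attackList_y, attackList_pre, a)
def pvStepA (state : List Int) (df_train_y : List Int)
    (acc : List Int × List Int × Int) (i : Int) : List Int × List Int × Int :=
  let ys := acc.1
  let pres := acc.2.1
  let a := acc.2.2
  let p : Int × List Int :=
    if PySem.List.pyGetD df_train_y (i-1) 0 = 0 ∧ PySem.List.pyGetD df_train_y i 0 = 1
    then (a + 1, ys ++ [a + 1]) else (a, ys)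
  let pres :=
    if PySem.List.pyGetD state (i-1) 0 = 0 ∧ PySem.List.pyGetD state i 0 = 1
    then pres ++ [p.1] else pres
  (p.2, pres, p.1)

def checkAtt (state : List Int) (df_train_y : List Int) : List Int × List Int :=
  let r := (PySem.List.pyRange 1 (state.length : Int) 1).foldl (pvStepA state df_train_y) ([], [], 0)
  (r.1, r.2.1)

-- ===== PORT B =====
-- first pass: build the cumulative-count table cum (cum[i] = transitions in df_train_y up to i)
def pvStepB (df_train_y : List Int) (acc : List Int × Int) (i : Int) : List Int × Int :=
  let c :=
    if PySem.List.pyGetD df_train_y (i-1) 0 = 0 ∧ PySem.List.pyGetD df_train_y i 0 = 1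
    then acc.2 + 1 else acc.2
  (acc.1 ++ [c], c)

def checkAtt_alt (state : List Int) (df_train_y : List Int) : List Int × List Int :=
  let n : Int := state.length
  let cc := (PySem.List.pyRange 1 n 1).foldl (pvStepB df_train_y) ([0], 0)
  let attackList_y := PySem.List.pyRange 1 (cc.2 + 1) 1
  let attackList_pre :=
    ((PySem.List.pyRange 1 n 1).filter
        (fun i => decide (PySem.List.pyGetD state (i-1) 0 = 0 ∧ PySem.List.pyGetD state i 0 = 1))).map
      (fun i => PySem.List.pyGetD cc.1 i 0)
  (attackList_y, attackList_pre)

-- ===== PRECONDITION & SPEC =====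
-- Pre_ excludes exactly the inputs where Python A raises IndexError: the loop reads
-- df_train_y[i] for i up to len(state)-1, so df_train_y must be at least as long as state
-- (unless the loop is empty, len(state) ≤ 1).
def Pre_checkAtt (state : List Int) (df_train_y : List Int) : Prop :=
  state.length ≤ 1 ∨ state.length ≤ df_train_y.length
instance (state : List Int) (df_train_y : List Int) : Decidable (Pre_checkAtt state df_train_y) := by
  unfold Pre_checkAtt; infer_instance

def pvWitness_checkAtt : List Int × List Int := ([0, 1, 0, 1], [0, 0, 1, 1])

def Spec_checkAtt (state : List Int) (df_train_y : List Int) (out : List Int × List Int) : Prop := out = checkAtt_alt state df_train_y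
instance (state : List Int) (df_train_y : List Int) (out : List Int × List Int) : Decidable (Spec_checkAtt state df_train_y out) := by unfold Spec_checkAtt; infer_instance

-- ===== CLAIM (what is proved, stated in full; the proofs are below) =====
def Claim_equal_checkAtt : Prop := ∀ (state : List Int) (df_train_y : List Int), Dom_checkAtt state df_train_y → Pre_checkAtt state df_train_y → Spec_checkAtt state df_train_y (checkAtt state df_train_y)

-- ===== LEMMAS AND PROOFS =====

lemma pv_getD_append_lt (xs : List Int) (v : Int) (i : Int) (h0 : 0 ≤ i) (h1 : i < xs.length) :
    PySem.List.pyGetD (xs ++ [v]) i 0 = PySem.List.pyGetD xs i 0 := by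
  rw [PySem.List.pyGetD_eq_getElem _ _ h0 (by simp; omega),
      PySem.List.pyGetD_eq_getElem _ _ h0 (by simpa using h1)]
  rw [List.getElem_append_left (by omega)]

lemma pv_getD_append_last (xs : List Int) (v : Int) :
    PySem.List.pyGetD (xs ++ [v]) (xs.length : Int) 0 = v := by
  rw [PySem.List.pyGetD_eq_getElem _ _ (by positivity) (by simp)]
  simp

-- the loop invariant relating A's fused fold to B's table fold, for n ≥ 1
lemma pv_inv (state df_train_y : List Int) (n : Nat) (hn : 1 ≤ n) :
    ((PySem.List.pyRange 1 (n : Int) 1).foldl (pvStepA state df_train_y) ([], [], 0)).2.2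
      = ((PySem.List.pyRange 1 (n : Int) 1).foldl (pvStepB df_train_y) ([0], 0)).2 ∧
    0 ≤ ((PySem.List.pyRange 1 (n : Int) 1).foldl (pvStepA state df_train_y) ([], [], 0)).2.2 ∧
    (((PySem.List.pyRange 1 (n : Int) 1).foldl (pvStepB df_train_y) ([0], 0)).1).length = n ∧
    ((PySem.List.pyRange 1 (n : Int) 1).foldl (pvStepA state df_train_y) ([], [], 0)).1
      = PySem.List.pyRange 1 (((PySem.List.pyRange 1 (n : Int) 1).foldl (pvStepA state df_train_y) ([], [], 0)).2.2 + 1) 1 ∧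
    ((PySem.List.pyRange 1 (n : Int) 1).foldl (pvStepA state df_train_y) ([], [], 0)).2.1
      = ((PySem.List.pyRange 1 (n : Int) 1).filter
            (fun i => decide (PySem.List.pyGetD state (i-1) 0 = 0 ∧ PySem.List.pyGetD state i 0 = 1))).map
          (fun i => PySem.List.pyGetD (((PySem.List.pyRange 1 (n : Int) 1).foldl (pvStepB df_train_y) ([0], 0)).1) i 0) := by
  induction n, hn using Nat.le_induction with
  | base =>
      simp [PySem.List.pyRange_one_eq_nil (by norm_num : (1:Int) ≤ 1)]
  | succ n hn ih =>
      have hsplit : PySem.List.pyRange 1 ((n+1 : Nat) : Int) 1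
          = PySem.List.pyRange 1 (n : Int) 1 ++ [(n : Int)] := by
        push_cast
        exact PySem.List.pyRange_one_succ_right (by exact_mod_cast hn)
      rw [hsplit]
      simp only [List.foldl_append, List.filter_append, List.map_append,
        List.foldl_cons, List.foldl_nil]
      set A := (PySem.List.pyRange 1 (n : Int) 1).foldl (pvStepA state df_train_y) ([], [], 0) with hA
      set B := (PySem.List.pyRange 1 (n : Int) 1).foldl (pvStepB df_train_y) ([0], 0) with hB
      obtain ⟨ih1, ih2, ih3, ih4, ih5⟩ := ih
      have hmap : ∀ c : Int,
          ((PySem.List.pyRange 1 (n : Int) 1).filter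
              (fun i => decide (PySem.List.pyGetD state (i-1) 0 = 0 ∧ PySem.List.pyGetD state i 0 = 1))).map
            (fun i => PySem.List.pyGetD (B.1 ++ [c]) i 0)
          = ((PySem.List.pyRange 1 (n : Int) 1).filter
              (fun i => decide (PySem.List.pyGetD state (i-1) 0 = 0 ∧ PySem.List.pyGetD state i 0 = 1))).map
            (fun i => PySem.List.pyGetD B.1 i 0) := by
        intro c
        apply List.map_congr_left
        intro i hi
        have hmem := (PySem.List.mem_pyRange_one).mp ((List.mem_filter.mp hi).1)
        exact pv_getD_append_lt _ _ _ (by omega) (by rw [ih3]; exact_mod_cast hmem.2)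
      have hlastc : ∀ c : Int, PySem.List.pyGetD (B.1 ++ [c]) (n : Int) 0 = c := by
        intro c
        have h' : ((n : Nat) : Int) = ((B.1).length : Int) := by rw [ih3]
        rw [h']
        exact pv_getD_append_last _ _
      simp only [pvStepA, pvStepB, List.filter_cons, List.filter_nil,
        decide_eq_true_eq]
      by_cases hp : PySem.List.pyGetD df_train_y ((n : Int)-1) 0 = 0 ∧ PySem.List.pyGetD df_train_y (n : Int) 0 = 1
      · by_cases hq : PySem.List.pyGetD state ((n : Int)-1) 0 = 0 ∧ PySem.List.pyGetD state (n : Int) 0 = 1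
        · simp only [if_pos hp, if_pos hq, List.map_cons, List.map_nil]
          refine ⟨by rw [ih1], by omega, by simp [ih3], ?_, ?_⟩
          · rw [ih4]
            exact (PySem.List.pyRange_one_succ_right (by omega)).symm
          · rw [hmap, hlastc, ih5, ih1]
        · simp only [if_pos hp, if_neg hq, List.map_nil, List.append_nil]
          refine ⟨by rw [ih1], by omega, by simp [ih3], ?_, ?_⟩
          · rw [ih4]
            exact (PySem.List.pyRange_one_succ_right (by omega)).symm
          · rw [hmap, ih5]
      · by_cases hq : PySem.List.pyGetD state ((n : Int)-1) 0 = 0 ∧ PySem.List.pyGetD state (n : Int) 0 = 1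
        · simp only [if_neg hp, if_pos hq, List.map_cons, List.map_nil]
          refine ⟨by rw [ih1], by omega, by simp [ih3], ih4, ?_⟩
          rw [hmap, hlastc, ih5, ih1]
        · simp only [if_neg hp, if_neg hq, List.map_nil, List.append_nil]
          exact ⟨by rw [ih1], by omega, by simp [ih3], ih4, by rw [hmap, ih5]⟩

-- ===== VERDICT (by name: the statement is the Claim_ definition above) =====
theorem checkAtt_spec : Claim_equal_checkAtt := by
  intro state df_train_y _ _
  unfold Spec_checkAtt
  by_cases h : state.length = 0
  · have e1 : PySem.List.pyRange 1 (state.length : Int) 1 = [] :=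
      PySem.List.pyRange_one_eq_nil (by omega)
    simp [checkAtt, checkAtt_alt, e1]
  · obtain ⟨h1, _, _, h4, h5⟩ := pv_inv state df_train_y state.length (by omega)
    dsimp only [checkAtt, checkAtt_alt]
    rw [h4, h5, h1]
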